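-- pv_equiv track=rewrite | github.com/msharsh/skyscrapers | skycrapers.py | check_uniqueness_in_rows
-- ===== SOURCE A (Python) =====
-- def check_uniqueness_in_rows(board: list) -> bool:
--     """
--     Check buildings of unique height in each row.
--
--     Return True if buildings in a row have unique length, False otherwise.
--
--     >>> check_uniqueness_in_rows(['***21**', '412453*', '423145*', '*543215', '*35214*', '*41532*', '*2*1***'])
--     True
--     >>> check_uniqueness_in_rows(['***21**', '452453*', '423145*', '*543215', '*35214*', '*41532*', '*2*1***'])
--     False
--     >>> check_uniqueness_in_rows(['***21**', '412453*', '423145*', '*553215', '*35214*', '*41532*', '*2*1***'])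
--     False
--     """
--     for i in range(1, len(board)-1):
--         line_temp = []
--         for j in range(1, len(board[i])-1):
--             if board[i][j] in line_temp:
--                 return False
--             line_temp.append(board[i][j])
--     return True
-- ===== SOURCE B (Python) =====
-- def check_uniqueness_in_rows(board: list) -> bool:
--     for row in board[1:-1]:
--         s = sorted(row[1:-1])
--         for x, y in zip(s, s[1:]):
--             if x == y:
--                 return False
--     return True
-- ===== Notes on version B (the rewrite author's own statement) =====
-- stated objective: alternative
-- what changed: Replaces the growing-list membership scan over column indices with slicing each interior row's interior, sorting it, and checking adjacent equal pairs in the sorted sequence.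
import Mathlib
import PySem

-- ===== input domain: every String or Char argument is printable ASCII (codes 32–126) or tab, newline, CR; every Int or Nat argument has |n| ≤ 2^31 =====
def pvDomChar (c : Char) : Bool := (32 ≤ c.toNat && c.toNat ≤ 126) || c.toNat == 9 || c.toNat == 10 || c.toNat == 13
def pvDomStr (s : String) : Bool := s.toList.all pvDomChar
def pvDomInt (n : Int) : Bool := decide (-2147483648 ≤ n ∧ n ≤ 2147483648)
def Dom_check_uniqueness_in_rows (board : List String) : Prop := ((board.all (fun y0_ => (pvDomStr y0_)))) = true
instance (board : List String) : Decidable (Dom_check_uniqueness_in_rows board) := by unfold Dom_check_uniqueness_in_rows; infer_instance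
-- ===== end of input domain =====

-- B sorts the interior slice of each interior row and looks for an equal adjacent pair,
-- instead of A's growing-list membership scan over column indices (alternative decomposition).

-- ===== PORT A =====
-- inner loop: for j in range(1, len(board[i])-1): membership test in line_temp, then append
def pvA_row (row : List Char) : List Int → List Char → Bool
  | [], _ => true
  | j :: js, temp =>
    match PySem.List.pyGet? row j with
    | none => false   -- unreachable: j ∈ range(1, len(row)-1) is always in range
    | some c => if temp.contains c then false else pvA_row row js (temp ++ [c])

-- outer loop: for i in range(1, len(board)-1); a False from a row is the early return
def pvA_rows (board : List String) : List Int → Bool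
  | [] => true
  | i :: is =>
    match PySem.List.pyGet? board i with
    | none => false   -- unreachable: i ∈ range(1, len(board)-1) is always in range
    | some row =>
      if pvA_row row.toList
          (PySem.List.pyRange 1 ((row.toList.length : Int) - 1) 1) [] then
        pvA_rows board is
      else false

def check_uniqueness_in_rows (board : List String) : Bool :=
  pvA_rows board (PySem.List.pyRange 1 ((board.length : Int) - 1) 1)

-- ===== PORT B =====
-- for x, y in zip(s, s[1:]): if x == y: return False
def pvB_hasAdjDup : List Char → Bool
  | a :: b :: rest => a == b || pvB_hasAdjDup (b :: rest)
  | _ => false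

def check_uniqueness_in_rows_alt (board : List String) : Bool :=
  (PySem.List.slice board (some 1) (some (-1))).all fun row =>
    !pvB_hasAdjDup
      (PySem.List.sorted (PySem.List.slice row.toList (some 1) (some (-1))) (fun c => c) false)

-- ===== PRECONDITION & SPEC =====
def Spec_check_uniqueness_in_rows (board : List String) (out : Bool) : Prop := out = check_uniqueness_in_rows_alt board
instance (board : List String) (out : Bool) : Decidable (Spec_check_uniqueness_in_rows board out) := by unfold Spec_check_uniqueness_in_rows; infer_instance

-- ===== CLAIM (what is proved, stated in full; the proofs are below) =====
def Claim_equal_check_uniqueness_in_rows : Prop := ∀ (board : List String), Dom_check_uniqueness_in_rows board → Spec_check_uniqueness_in_rows board (check_uniqueness_in_rows board)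

-- ===== LEMMAS AND PROOFS =====

-- proof-only reformulation of A's inner membership scan, over the visited characters themselves
def pvScan : List Char → List Char → Bool
  | [], _ => true
  | c :: cs, temp => if temp.contains c then false else pvScan cs (temp ++ [c])

-- the interior slice xs[1:-1] as drop/take
theorem pv_slice_interior {α : Type} (xs : List α) :
    PySem.List.slice xs (some 1) (some (-1)) = (xs.drop 1).take (xs.length - 2) := by
  match xs with
  | [] => simp [PySem.List.slice]
  | x :: t =>
    simp [PySem.List.slice, PySem.List.clampIdx]
    split_ifs with h
    · exact absurd h (by omega)
    · omega

-- A's inner loop over pyRange a (a+k) equals the scan over the corresponding slice of the row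
theorem pvA_row_eq_scan (row : List Char) (k : Nat) :
    ∀ (a : Nat) (temp : List Char), a + k ≤ row.length →
      pvA_row row (PySem.List.pyRange (a : Int) ((a : Int) + (k : Int)) 1) temp
        = pvScan ((row.drop a).take k) temp := by
  induction k with
  | zero =>
    intro a temp _
    rw [PySem.List.pyRange_one_eq_nil (by omega)]
    simp [pvA_row, pvScan]
  | succ k ih =>
    intro a temp h
    rw [PySem.List.pyRange_one_cons (by omega)]
    have ha : a < row.length := by omega
    have hd : row.drop a = row[a] :: row.drop (a + 1) := List.drop_eq_getElem_cons ha
    rw [hd]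
    simp only [List.take_succ_cons, pvA_row, pvScan,
      PySem.List.pyGet?_natCast, List.getElem?_eq_getElem ha]
    have : ((a : Int) + 1) = ((a + 1 : Nat) : Int) := by push_cast; ring
    rw [this]
    have : (a : Int) + ((k : Nat) + 1 : Nat) = ((a + 1 : Nat) : Int) + (k : Int) := by push_cast; ring
    rw [this]
    split_ifs with hc
    · rfl
    · exact ih (a + 1) (temp ++ [row[a]]) (by omega)

-- the membership scan decides nodup of temp ++ xs (for nodup temp)
theorem pvScan_eq_nodup (xs : List Char) :
    ∀ temp : List Char, temp.Nodup → (pvScan xs temp = true ↔ (temp ++ xs).Nodup) := by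
  induction xs with
  | nil => intro temp h; simpa [pvScan] using h
  | cons c cs ih =>
    intro temp h
    by_cases hc : temp.contains c
    · simp only [pvScan, if_pos hc]
      constructor
      · intro hf; exact absurd hf (by simp)
      · intro hn
        exfalso
        have hcm : c ∈ temp := by simpa using hc
        exact (List.nodup_append.mp hn).2.2 c hcm c (List.mem_cons_self ..) rfl
    · simp only [pvScan, if_neg hc]
      rw [ih (temp ++ [c]) (by
        refine List.Nodup.append h (List.nodup_singleton c) ?_
        intro a ha hac
        simp only [List.mem_singleton] at hac
        subst hac
        exact (by simpa using hc : a ∉ temp) ha)]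
      constructor
      · intro hn
        simpa [List.append_assoc] using hn
      · intro hn
        simpa [List.append_assoc] using hn

-- on a ≤-pairwise list, absence of an equal adjacent pair is exactly nodup
theorem pvB_adj_of_pairwise (l : List Char) (h : l.Pairwise (· ≤ ·)) :
    pvB_hasAdjDup l = false ↔ l.Nodup := by
  induction l with
  | nil => simp [pvB_hasAdjDup]
  | cons a t ih =>
    match t with
    | [] => simp [pvB_hasAdjDup]
    | b :: rest =>
      have hab : a ≤ b := (List.pairwise_cons.mp h).1 b (by simp)
      have htail : (b :: rest).Pairwise (· ≤ ·) := (List.pairwise_cons.mp h).2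
      rw [show pvB_hasAdjDup (a :: b :: rest) = ((a == b) || pvB_hasAdjDup (b :: rest)) from rfl]
      constructor
      · intro hf
        have h1 : (a == b) = false := by
          cases hh : (a == b) <;> simp [hh] at hf ⊢
        have h2 : pvB_hasAdjDup (b :: rest) = false := by
          cases hh : pvB_hasAdjDup (b :: rest) <;> simp [hh] at hf ⊢
        have hne : a ≠ b := by simpa using h1
        have hnd : (b :: rest).Nodup := (ih htail).mp h2
        refine List.nodup_cons.mpr ⟨?_, hnd⟩
        intro hmem
        rcases List.mem_cons.mp hmem with rfl | hr
        · exact hne rfl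
        · have hbr : b ≤ a := (List.pairwise_cons.mp htail).1 a hr
          exact hne (le_antisymm hab hbr)
      · intro hn
        have hne : a ≠ b := by
          intro e; subst e; exact (List.nodup_cons.mp hn).1 (by simp)
        have h2 : pvB_hasAdjDup (b :: rest) = false := (ih htail).mpr (List.nodup_cons.mp hn).2
        simp [hne, h2]

-- per-row equivalence: A's inner loop versus B's sort-and-adjacent-compare
theorem pv_row_eq (row : List Char) :
    pvA_row row (PySem.List.pyRange 1 ((row.length : Int) - 1) 1) []
      = !pvB_hasAdjDup (PySem.List.sorted (PySem.List.slice row (some 1) (some (-1))) (fun c => c) false) := by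
  by_cases hlen : 2 ≤ row.length
  · have hk : ((row.length : Int) - 1) = (1 : Int) + ((row.length - 2 : Nat) : Int) := by
      omega
    have hstep := pvA_row_eq_scan row (row.length - 2) 1 [] (by omega)
    simp only [Nat.cast_one] at hstep
    rw [hk, hstep, pv_slice_interior]
    set l := (row.drop 1).take (row.length - 2) with hl
    have h1 : (pvScan l [] = true) ↔ l.Nodup := by simpa using pvScan_eq_nodup l [] (by simp)
    have hpw : (PySem.List.sorted l (fun c => c) false).Pairwise (· ≤ ·) :=
      PySem.List.sorted_pairwise ..
    have h2 : pvB_hasAdjDup (PySem.List.sorted l (fun c => c) false) = false ↔ l.Nodup := by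
      rw [pvB_adj_of_pairwise _ hpw]
      exact (PySem.List.sorted_perm ..).nodup_iff
    cases hb : pvB_hasAdjDup (PySem.List.sorted l (fun c => c) false)
    · simp only [Bool.not_false]
      exact h1.mpr (h2.mp hb)
    · simp only [Bool.not_true]
      cases hs : pvScan l []
      · rfl
      · exact absurd (h2.mpr (h1.mp hs)) (by simp [hb])
  · rw [PySem.List.pyRange_one_eq_nil (by omega), pv_slice_interior,
      show row.length - 2 = 0 by omega, List.take_zero]
    rfl

-- A's outer loop over pyRange a (a+k) equals all over the corresponding slice of the board
theorem pvA_rows_eq_all (board : List String) (k : Nat) :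
    ∀ (a : Nat), a + k ≤ board.length →
      pvA_rows board (PySem.List.pyRange (a : Int) ((a : Int) + (k : Int)) 1)
        = ((board.drop a).take k).all fun row =>
            pvA_row row.toList (PySem.List.pyRange 1 ((row.toList.length : Int) - 1) 1) [] := by
  induction k with
  | zero =>
    intro a _
    rw [PySem.List.pyRange_one_eq_nil (by omega)]
    simp [pvA_rows]
  | succ k ih =>
    intro a h
    rw [PySem.List.pyRange_one_cons (by omega)]
    have ha : a < board.length := by omega
    have hd : board.drop a = board[a] :: board.drop (a + 1) := List.drop_eq_getElem_cons ha
    rw [hd]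
    simp only [List.take_succ_cons, pvA_rows, List.all_cons,
      PySem.List.pyGet?_natCast, List.getElem?_eq_getElem ha]
    have : ((a : Int) + 1) = ((a + 1 : Nat) : Int) := by push_cast; ring
    rw [this]
    have : (a : Int) + ((k : Nat) + 1 : Nat) = ((a + 1 : Nat) : Int) + (k : Int) := by push_cast; ring
    rw [this]
    split_ifs with hr
    · rw [ih (a + 1) (by omega)]
      simp only [hr, Bool.true_and]
    · simp only [Bool.not_eq_true] at hr
      simp only [hr, Bool.false_and]

-- ===== VERDICT (by name: the statement is the Claim_ definition above) =====
theorem check_uniqueness_in_rows_spec : Claim_equal_check_uniqueness_in_rows := by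
  intro board _
  show check_uniqueness_in_rows board = check_uniqueness_in_rows_alt board
  unfold check_uniqueness_in_rows check_uniqueness_in_rows_alt
  by_cases hlen : 2 ≤ board.length
  · have hk : ((board.length : Int) - 1) = (1 : Int) + ((board.length - 2 : Nat) : Int) := by
      omega
    have hstep := pvA_rows_eq_all board (board.length - 2) 1 (by omega)
    simp only [Nat.cast_one] at hstep
    rw [hk, hstep, pv_slice_interior]
    have hfun : (fun row : String => pvA_row row.toList
          (PySem.List.pyRange 1 ((row.toList.length : Int) - 1) 1) [])
        = (fun row : String => !pvB_hasAdjDup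
            (PySem.List.sorted (PySem.List.slice row.toList (some 1) (some (-1))) (fun c => c) false)) :=
      funext fun r => pv_row_eq r.toList
    rw [hfun]
  · rw [PySem.List.pyRange_one_eq_nil (by omega), pv_slice_interior,
      show board.length - 2 = 0 by omega, List.take_zero]
    rfl
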